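-- pv_equiv track=rewrite | github.com/hishamalhadi/aos | core/services/bridge/vault_tasks.py | format_tasks_telegram
-- ===== SOURCE A (Python) =====
-- def format_tasks_telegram(tasks: list[dict]) -> str:
--     """Format tasks for Telegram HTML output."""
--     if not tasks:
--         return "<i>No tasks.</i>"
--
--     # Group by status
--     groups = {}
--     for t in tasks:
--         status = t.get("status", "backlog")
--         groups.setdefault(status, []).append(t)
--
--     icons = {
--         "focus": "🎯",
--         "in-progress": "🔄",
--         "todo": "⬜",
--         "waiting": "⏳",
--         "backlog": "📋",
--         "done": "✅",
--         "blocked": "🚫",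
--     }
--
--     # Display order
--     order = ["focus", "in-progress", "todo", "waiting", "backlog", "done"]
--     lines = []
--
--     for status in order:
--         if status not in groups:
--             continue
--         icon = icons.get(status, "⬜")
--         lines.append(f"\n<b>{status.upper()}</b>")
--         for t in sorted(groups[status], key=lambda x: x.get("priority", 9)):
--             title = t.get("title", "Untitled")
--             domain = t.get("domain", "")
--             priority = t.get("priority", "")
--             p_str = f" P{priority}" if priority else ""
--             d_str = f" <i>({domain})</i>" if domain else ""
--             waiting = ""
--             if status == "waiting" and t.get("waiting_on"):
--                 waiting = f" — waiting on {t['waiting_on']}"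
--             lines.append(f"  {icon} {title}{p_str}{d_str}{waiting}")
--
--     return "\n".join(lines) if lines else "<i>No tasks.</i>"
-- ===== SOURCE B (Python) =====
-- def format_tasks_telegram(tasks: list[dict]) -> str:
--     """Format tasks for Telegram HTML output (per-status filter passes, no grouping dict)."""
--     if not tasks:
--         return "<i>No tasks.</i>"
--     sections = []
--     for status, icon in [("focus", "\U0001F3AF"), ("in-progress", "\U0001F504"),
--                          ("todo", "\u2B1C"), ("waiting", "\u23F3"),
--                          ("backlog", "\U0001F4CB"), ("done", "\u2705")]:
--         group = [t for t in tasks if t.get("status", "backlog") == status]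
--         if not group:
--             continue
--         body = "\n".join(_task_line(icon, status, t)
--                          for t in sorted(group, key=lambda x: x.get("priority", 9)))
--         sections.append(f"\n<b>{status.upper()}</b>\n" + body)
--     return "\n".join(sections) if sections else "<i>No tasks.</i>"
--
--
-- def _task_line(icon, status, t):
--     p = t.get("priority", "")
--     d = t.get("domain", "")
--     w = t.get("waiting_on", "") if status == "waiting" else ""
--     return ("  " + icon + " " + t.get("title", "Untitled")
--             + (f" P{p}" if p else "")
--             + (f" <i>({d})</i>" if d else "")
--             + (f" \u2014 waiting on {w}" if w else ""))
-- ===== Notes on version B (the rewrite author's own statement) =====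
-- stated objective: simpler
-- what changed: B drops A's grouping dict and per-status append loop entirely: for each status in the fixed display order it filters the task list directly, formats the sorted group's lines via a helper, joins them into one section string, and joins the sections; the Pre_ excludes only inputs where a displayed status group mixes tasks with and without a 'priority' key, on which sorted(key=x.get('priority',9)) makes both A and B raise TypeError.
import Mathlib
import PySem

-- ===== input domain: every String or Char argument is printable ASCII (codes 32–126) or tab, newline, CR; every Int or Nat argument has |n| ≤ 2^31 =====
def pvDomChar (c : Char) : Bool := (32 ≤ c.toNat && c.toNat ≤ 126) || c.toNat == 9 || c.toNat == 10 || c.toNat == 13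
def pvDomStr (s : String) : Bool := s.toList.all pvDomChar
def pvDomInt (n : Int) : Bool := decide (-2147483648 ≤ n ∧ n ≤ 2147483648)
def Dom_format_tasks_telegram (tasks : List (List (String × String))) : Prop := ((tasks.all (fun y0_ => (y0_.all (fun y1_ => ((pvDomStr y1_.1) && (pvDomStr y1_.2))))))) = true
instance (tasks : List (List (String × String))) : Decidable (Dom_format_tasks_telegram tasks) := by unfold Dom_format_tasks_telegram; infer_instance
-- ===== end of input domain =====

-- B drops A's grouping dict: it builds each status section directly by filtering the task list
-- and joining that section's lines, then joins the sections (objective: simpler; same output).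

-- ===== PORT A =====
-- Python's sort key t.get("priority", 9) mixes the int default 9 with str values; on the inputs
-- admitted by Pre_ every sorted group is homogeneous, and the key is ported exactly there as the
-- pair (has-"priority", priority-string) via PySem.List.sorted2.
def format_tasks_telegram (tasks : List (List (String × String))) : String :=
  if tasks = [] then "<i>No tasks.</i>"
  else
    let groups : PySem.Dict String (List (List (String × String))) :=
      tasks.foldl (fun d t =>
        d.modify ((PySem.Dict.ofList t).getD "status" "backlog") [] (fun v => v ++ [t]))
        PySem.Dict.empty
    let icons : PySem.Dict String String :=
      PySem.Dict.ofList [("focus", "🎯"), ("in-progress", "🔄"), ("todo", "⬜"),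
        ("waiting", "⏳"), ("backlog", "📋"), ("done", "✅"), ("blocked", "🚫")]
    let order : List String := ["focus", "in-progress", "todo", "waiting", "backlog", "done"]
    let lines : List String :=
      order.foldl (fun lines status =>
        if groups.contains status = false then lines
        else
          let icon := icons.getD status "⬜"
          let lines := lines ++ ["\n<b>" ++ PySem.Str.upper status ++ "</b>"]
          (PySem.List.sorted2 (groups.getD status [])
              (fun x => (PySem.Dict.ofList x).contains "priority")
              (fun x => (PySem.Dict.ofList x).getD "priority" "")).foldl
            (fun lines t =>
              let title := (PySem.Dict.ofList t).getD "title" "Untitled"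
              let domain := (PySem.Dict.ofList t).getD "domain" ""
              let priority := (PySem.Dict.ofList t).getD "priority" ""
              let p_str := if priority ≠ "" then " P" ++ priority else ""
              let d_str := if domain ≠ "" then " <i>(" ++ domain ++ ")</i>" else ""
              let waiting :=
                if status = "waiting" ∧ (PySem.Dict.ofList t).getD "waiting_on" "" ≠ "" then
                  " — waiting on " ++ (PySem.Dict.ofList t).getD "waiting_on" ""
                else ""
              lines ++ ["  " ++ icon ++ " " ++ title ++ p_str ++ d_str ++ waiting])
            lines) []
    if lines ≠ [] then PySem.Str.join "\n" lines else "<i>No tasks.</i>"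

-- ===== PORT B =====
def pvTaskLine (icon status : String) (t : List (String × String)) : String :=
  let p := (PySem.Dict.ofList t).getD "priority" ""
  let d := (PySem.Dict.ofList t).getD "domain" ""
  let w := if status = "waiting" then (PySem.Dict.ofList t).getD "waiting_on" "" else ""
  "  " ++ icon ++ " " ++ (PySem.Dict.ofList t).getD "title" "Untitled"
    ++ (if p ≠ "" then " P" ++ p else "")
    ++ (if d ≠ "" then " <i>(" ++ d ++ ")</i>" else "")
    ++ (if w ≠ "" then " — waiting on " ++ w else "")

def format_tasks_telegram_alt (tasks : List (List (String × String))) : String :=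
  if tasks = [] then "<i>No tasks.</i>"
  else
    let sections : List String :=
      [("focus", "🎯"), ("in-progress", "🔄"), ("todo", "⬜"),
       ("waiting", "⏳"), ("backlog", "📋"), ("done", "✅")].foldl (fun secs si =>
        let group := tasks.filter
          (fun t => (PySem.Dict.ofList t).getD "status" "backlog" == si.1)
        if group = [] then secs
        else
          secs ++ ["\n<b>" ++ PySem.Str.upper si.1 ++ "</b>\n" ++
            PySem.Str.join "\n"
              ((PySem.List.sorted2 group
                  (fun x => (PySem.Dict.ofList x).contains "priority")
                  (fun x => (PySem.Dict.ofList x).getD "priority" "")).map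
                (pvTaskLine si.2 si.1))]) []
    if sections = [] then "<i>No tasks.</i>" else PySem.Str.join "\n" sections

-- ===== PRECONDITION & SPEC =====
-- Pre_ excludes exactly the inputs on which some displayed status group mixes tasks that have a
-- "priority" key with tasks that lack it: there sorted(..., key=lambda x: x.get("priority", 9))
-- compares the int default 9 with a str and Python A (and B alike) raises TypeError.
def Pre_format_tasks_telegram (tasks : List (List (String × String))) : Prop :=
  ∀ s ∈ (["focus", "in-progress", "todo", "waiting", "backlog", "done"] : List String),
    (tasks.filter (fun t => (PySem.Dict.ofList t).getD "status" "backlog" == s)).all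
        (fun t => (PySem.Dict.ofList t).contains "priority") = true
    ∨ (tasks.filter (fun t => (PySem.Dict.ofList t).getD "status" "backlog" == s)).all
        (fun t => !(PySem.Dict.ofList t).contains "priority") = true
instance (tasks : List (List (String × String))) : Decidable (Pre_format_tasks_telegram tasks) := by
  unfold Pre_format_tasks_telegram; infer_instance

def pvWitness_format_tasks_telegram : (List (List (String × String))) :=
  [[("title", "write report"), ("status", "focus")], [("title", "rest")]]

def Spec_format_tasks_telegram (tasks : List (List (String × String))) (out : String) : Prop :=
  out = format_tasks_telegram_alt tasks
instance (tasks : List (List (String × String))) (out : String) :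
    Decidable (Spec_format_tasks_telegram tasks out) := by
  unfold Spec_format_tasks_telegram; infer_instance

-- ===== CLAIM (what is proved, stated in full; the proofs are below) =====
def Claim_equal_format_tasks_telegram : Prop :=
  ∀ (tasks : List (List (String × String))), Dom_format_tasks_telegram tasks →
    Pre_format_tasks_telegram tasks →
    Spec_format_tasks_telegram tasks (format_tasks_telegram tasks)

-- ===== LEMMAS AND PROOFS =====

-- proof-side names for the pieces both ports share: the group of a status, the two sort keys,
-- A's icon dict, and the two per-status blocks of output lines
def pvGroup (tasks : List (List (String × String))) (s : String) : List (List (String × String)) :=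
  tasks.filter (fun t => (PySem.Dict.ofList t).getD "status" "backlog" == s)
def pvK1 (x : List (String × String)) : Bool := (PySem.Dict.ofList x).contains "priority"
def pvK2 (x : List (String × String)) : String := (PySem.Dict.ofList x).getD "priority" ""
def pvIcons : PySem.Dict String String :=
  PySem.Dict.ofList [("focus", "🎯"), ("in-progress", "🔄"), ("todo", "⬜"),
    ("waiting", "⏳"), ("backlog", "📋"), ("done", "✅"), ("blocked", "🚫")]
def pvABlock (tasks : List (List (String × String))) (s : String) : List String :=
  if pvGroup tasks s = [] then []
  else ("\n<b>" ++ PySem.Str.upper s ++ "</b>") ::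
    (PySem.List.sorted2 (pvGroup tasks s) pvK1 pvK2).map (pvTaskLine (pvIcons.getD s "⬜") s)
def pvBBlock (tasks : List (List (String × String))) (si : String × String) : List String :=
  if pvGroup tasks si.1 = [] then []
  else ["\n<b>" ++ PySem.Str.upper si.1 ++ "</b>\n" ++
    PySem.Str.join "\n"
      ((PySem.List.sorted2 (pvGroup tasks si.1) pvK1 pvK2).map (pvTaskLine si.2 si.1))]

-- A's grouping dict looked up at s is exactly the filter of tasks with status s
lemma pvGroups_getD (tasks : List (List (String × String))) (s : String) :
    (tasks.foldl (fun d t =>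
        d.modify ((PySem.Dict.ofList t).getD "status" "backlog") [] (fun v => v ++ [t]))
        PySem.Dict.empty).getD s [] = pvGroup tasks s := by
  have h1 :
      tasks.foldl (fun d t =>
        d.modify ((PySem.Dict.ofList t).getD "status" "backlog") [] (fun v => v ++ [t]))
        PySem.Dict.empty =
      (tasks.map (fun t => ((PySem.Dict.ofList t).getD "status" "backlog", t))).foldl
        (fun d p => d.modify p.1 [] (fun v => v ++ [p.2])) PySem.Dict.empty :=
    (@List.foldl_map (List (String × String)) (String × List (String × String))
      (PySem.Dict String (List (List (String × String))))
      (fun t => ((PySem.Dict.ofList t).getD "status" "backlog", t))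
      (fun d p => d.modify p.1 [] (fun v => v ++ [p.2])) tasks PySem.Dict.empty).symm
  rw [h1, PySem.Dict.getD_foldl_modify_append, List.filter_map]
  simp [pvGroup, Function.comp_def]

-- A's membership test on the grouping dict is B's emptiness test on the filter
lemma pvGroups_contains (tasks : List (List (String × String))) (s : String) :
    ((tasks.foldl (fun d t =>
        d.modify ((PySem.Dict.ofList t).getD "status" "backlog") [] (fun v => v ++ [t]))
        PySem.Dict.empty).contains s = false) = (pvGroup tasks s = []) := by
  have hk := PySem.Dict.keys_foldl_modify_key tasks
      (fun t => (PySem.Dict.ofList t).getD "status" "backlog") []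
      (fun _ t => (fun v => v ++ [t])) PySem.Dict.empty
  apply propext
  constructor
  · intro h
    rw [pvGroup, List.filter_eq_nil_iff]
    intro t ht hbt
    have : ((tasks.foldl (fun d t =>
        d.modify ((PySem.Dict.ofList t).getD "status" "backlog") [] (fun v => v ++ [t]))
        PySem.Dict.empty).contains s = true) := by
      rw [PySem.Dict.contains_iff_mem_keys, hk]
      simp [PySem.Dict.keys_empty]
      exact ⟨t, ht, (beq_iff_eq.mp hbt)⟩
    simp [this] at h
  · intro h
    rw [pvGroup, List.filter_eq_nil_iff] at h
    rw [Bool.eq_false_iff]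
    intro hc
    rw [PySem.Dict.contains_iff_mem_keys, hk] at hc
    simp [PySem.Dict.keys_empty] at hc
    obtain ⟨t, ht, hst⟩ := hc
    exact h t ht (by simp [hst])

-- A's inline line formatting is B's pvTaskLine
lemma pvLine_eq (icon status : String) (t : List (String × String)) :
    ("  " ++ icon ++ " " ++ (PySem.Dict.ofList t).getD "title" "Untitled"
      ++ (if (PySem.Dict.ofList t).getD "priority" "" ≠ "" then
            " P" ++ (PySem.Dict.ofList t).getD "priority" "" else "")
      ++ (if (PySem.Dict.ofList t).getD "domain" "" ≠ "" then
            " <i>(" ++ (PySem.Dict.ofList t).getD "domain" "" ++ ")</i>" else "")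
      ++ (if status = "waiting" ∧ (PySem.Dict.ofList t).getD "waiting_on" "" ≠ "" then
            " — waiting on " ++ (PySem.Dict.ofList t).getD "waiting_on" "" else "")) =
    pvTaskLine icon status t := by
  unfold pvTaskLine
  by_cases hw : status = "waiting" <;> simp [hw]

-- join over two nonempty halves splits at the seam
lemma pvJoin_append_ne (sep : List Char) (p q : List (List Char)) (hp : p ≠ []) (hq : q ≠ []) :
    PySem.Chars.join sep (p ++ q) =
      PySem.Chars.join sep p ++ sep ++ PySem.Chars.join sep q := by
  induction p with
  | nil => exact absurd rfl hp
  | cons a p ih =>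
    cases p with
    | nil =>
      cases q with
      | nil => exact absurd rfl hq
      | cons b q' =>
        rw [List.singleton_append, PySem.Chars.join_cons_cons, PySem.Chars.join_singleton]
    | cons c p' =>
      have h : ((a :: c :: p') ++ q) = a :: ((c :: p') ++ q) := rfl
      rw [h, List.cons_append, PySem.Chars.join_cons_cons, PySem.Chars.join_cons_cons,
        ← List.cons_append, ih (by simp)]
      simp [List.append_assoc]

-- dropping the empty blocks leaves no section iff there is no line at all
lemma pvFlatMap_sec_nil {α β : Type} (g : List α → β) (M : List (List α)) :
    (M.flatMap (fun m => if m = [] then [] else [g m]) = []) ↔ M.flatten = [] := by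
  rw [List.flatMap_eq_nil_iff, List.flatten_eq_nil_iff]
  constructor
  · intro h m hm
    have hg := h m hm
    by_cases hm' : m = []
    · exact hm'
    · simp [hm'] at hg
  · intro h m hm
    simp [h m hm]

-- joining all lines equals joining the per-block joins (empty blocks dropped), char level
lemma pvChars_joinEq (sep : List Char) (M : List (List (List Char))) :
    PySem.Chars.join sep M.flatten =
      PySem.Chars.join sep
        (M.flatMap (fun m => if m = [] then [] else [PySem.Chars.join sep m])) := by
  induction M with
  | nil => rfl
  | cons m tl ih =>
    by_cases hm : m = []
    · simp [hm, ih]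
    · rw [List.flatten_cons, List.flatMap_cons, if_neg hm]
      by_cases htl : tl.flatten = []
      · rw [htl, List.append_nil]
        rw [(pvFlatMap_sec_nil (PySem.Chars.join sep) tl).mpr htl, List.append_nil,
          PySem.Chars.join_singleton]
      · have hfm : tl.flatMap (fun m => if m = [] then [] else [PySem.Chars.join sep m]) ≠ [] := by
          intro h; exact htl ((pvFlatMap_sec_nil (PySem.Chars.join sep) tl).mp h)
        obtain ⟨b, r, hbr⟩ := List.exists_cons_of_ne_nil hfm
        rw [pvJoin_append_ne sep m tl.flatten hm htl, ih, List.singleton_append, hbr,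
          PySem.Chars.join_cons_cons, ← hbr]

-- the same at the String level
lemma pvStr_joinEq (L : List (List String)) :
    PySem.Str.join "\n" L.flatten =
      PySem.Str.join "\n" (L.flatMap (fun l => if l = [] then [] else [PySem.Str.join "\n" l])) := by
  apply String.toList_inj.mp
  rw [PySem.Str.toList_join, PySem.Str.toList_join, List.map_flatten, List.map_flatMap,
    pvChars_joinEq,
    List.flatMap_map (List.map String.toList)
      (fun m => if m = [] then [] else [PySem.Chars.join "\n".toList m]) L]
  have h : ∀ a : List String,
      ((if List.map String.toList a = [] then []
        else [PySem.Chars.join "\n".toList (List.map String.toList a)]) : List (List Char)) =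
      List.map String.toList (if a = [] then [] else [PySem.Str.join "\n" a]) := by
    intro a
    by_cases ha : a = [] <;> simp [ha, PySem.Str.toList_join]
  exact congrArg _ (congrArg (fun f => List.flatMap f L) (funext h))

-- A's outer loop produces exactly the concatenation of the per-status blocks
lemma pvA_lines (tasks : List (List (String × String))) (l : List String) (acc : List String) :
    l.foldl (fun lines status =>
        if (tasks.foldl (fun d t =>
              d.modify ((PySem.Dict.ofList t).getD "status" "backlog") [] (fun v => v ++ [t]))
              PySem.Dict.empty).contains status = false then lines
        else
          (PySem.List.sorted2
              ((tasks.foldl (fun d t =>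
                  d.modify ((PySem.Dict.ofList t).getD "status" "backlog") [] (fun v => v ++ [t]))
                  PySem.Dict.empty).getD status [])
              (fun x => (PySem.Dict.ofList x).contains "priority")
              (fun x => (PySem.Dict.ofList x).getD "priority" "")).foldl
            (fun lines t =>
              lines ++ ["  " ++ pvIcons.getD status "⬜" ++ " "
                ++ (PySem.Dict.ofList t).getD "title" "Untitled"
                ++ (if (PySem.Dict.ofList t).getD "priority" "" ≠ "" then
                      " P" ++ (PySem.Dict.ofList t).getD "priority" "" else "")
                ++ (if (PySem.Dict.ofList t).getD "domain" "" ≠ "" then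
                      " <i>(" ++ (PySem.Dict.ofList t).getD "domain" "" ++ ")</i>" else "")
                ++ (if status = "waiting" ∧ (PySem.Dict.ofList t).getD "waiting_on" "" ≠ "" then
                      " — waiting on " ++ (PySem.Dict.ofList t).getD "waiting_on" "" else "")])
            (lines ++ ["\n<b>" ++ PySem.Str.upper status ++ "</b>"])) acc
      = acc ++ l.flatMap (pvABlock tasks) := by
  have hfn : (fun (lines : List String) (status : String) =>
      if (tasks.foldl (fun d t =>
            d.modify ((PySem.Dict.ofList t).getD "status" "backlog") [] (fun v => v ++ [t]))
            PySem.Dict.empty).contains status = false then lines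
      else
        (PySem.List.sorted2
            ((tasks.foldl (fun d t =>
                d.modify ((PySem.Dict.ofList t).getD "status" "backlog") [] (fun v => v ++ [t]))
                PySem.Dict.empty).getD status [])
            (fun x => (PySem.Dict.ofList x).contains "priority")
            (fun x => (PySem.Dict.ofList x).getD "priority" "")).foldl
          (fun lines t =>
            lines ++ ["  " ++ pvIcons.getD status "⬜" ++ " "
              ++ (PySem.Dict.ofList t).getD "title" "Untitled"
              ++ (if (PySem.Dict.ofList t).getD "priority" "" ≠ "" then
                    " P" ++ (PySem.Dict.ofList t).getD "priority" "" else "")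
              ++ (if (PySem.Dict.ofList t).getD "domain" "" ≠ "" then
                    " <i>(" ++ (PySem.Dict.ofList t).getD "domain" "" ++ ")</i>" else "")
              ++ (if status = "waiting" ∧ (PySem.Dict.ofList t).getD "waiting_on" "" ≠ "" then
                    " — waiting on " ++ (PySem.Dict.ofList t).getD "waiting_on" "" else "")])
          (lines ++ ["\n<b>" ++ PySem.Str.upper status ++ "</b>"])) =
      (fun lines status => lines ++ pvABlock tasks status) := by
    funext lines status
    rw [PySem.List.foldl_append_singleton_eq_map
      (fun t => "  " ++ pvIcons.getD status "⬜" ++ " "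
        ++ (PySem.Dict.ofList t).getD "title" "Untitled"
        ++ (if (PySem.Dict.ofList t).getD "priority" "" ≠ "" then
              " P" ++ (PySem.Dict.ofList t).getD "priority" "" else "")
        ++ (if (PySem.Dict.ofList t).getD "domain" "" ≠ "" then
              " <i>(" ++ (PySem.Dict.ofList t).getD "domain" "" ++ ")</i>" else "")
        ++ (if status = "waiting" ∧ (PySem.Dict.ofList t).getD "waiting_on" "" ≠ "" then
              " — waiting on " ++ (PySem.Dict.ofList t).getD "waiting_on" "" else ""))]
    simp only [pvGroups_contains, pvGroups_getD]
    by_cases hg : pvGroup tasks status = []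
    · simp [pvABlock, hg]
    · rw [if_neg hg, pvABlock, if_neg hg]
      have hl : ∀ t : List (String × String),
          ("  " ++ pvIcons.getD status "⬜" ++ " "
            ++ (PySem.Dict.ofList t).getD "title" "Untitled"
            ++ (if (PySem.Dict.ofList t).getD "priority" "" ≠ "" then
                  " P" ++ (PySem.Dict.ofList t).getD "priority" "" else "")
            ++ (if (PySem.Dict.ofList t).getD "domain" "" ≠ "" then
                  " <i>(" ++ (PySem.Dict.ofList t).getD "domain" "" ++ ")</i>" else "")
            ++ (if status = "waiting" ∧ (PySem.Dict.ofList t).getD "waiting_on" "" ≠ "" then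
                  " — waiting on " ++ (PySem.Dict.ofList t).getD "waiting_on" "" else "")) =
          pvTaskLine (pvIcons.getD status "⬜") status t := fun t =>
        pvLine_eq (pvIcons.getD status "⬜") status t
      simp only [hl, List.append_assoc, List.singleton_append]
      rfl
  rw [hfn, PySem.List.foldl_append_eq_flatMap (pvABlock tasks) l acc]

-- B's outer loop produces exactly the concatenation of the per-status sections
lemma pvB_sections (tasks : List (List (String × String))) (l : List (String × String))
    (acc : List String) :
    l.foldl (fun secs si =>
        if tasks.filter
            (fun t => (PySem.Dict.ofList t).getD "status" "backlog" == si.1) = [] then secs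
        else
          secs ++ ["\n<b>" ++ PySem.Str.upper si.1 ++ "</b>\n" ++
            PySem.Str.join "\n"
              ((PySem.List.sorted2
                  (tasks.filter
                    (fun t => (PySem.Dict.ofList t).getD "status" "backlog" == si.1))
                  (fun x => (PySem.Dict.ofList x).contains "priority")
                  (fun x => (PySem.Dict.ofList x).getD "priority" "")).map
                (pvTaskLine si.2 si.1))]) acc
      = acc ++ l.flatMap (pvBBlock tasks) := by
  have hfn : (fun (secs : List String) (si : String × String) =>
      if tasks.filter
          (fun t => (PySem.Dict.ofList t).getD "status" "backlog" == si.1) = [] then secs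
      else
        secs ++ ["\n<b>" ++ PySem.Str.upper si.1 ++ "</b>\n" ++
          PySem.Str.join "\n"
            ((PySem.List.sorted2
                (tasks.filter
                  (fun t => (PySem.Dict.ofList t).getD "status" "backlog" == si.1))
                (fun x => (PySem.Dict.ofList x).contains "priority")
                (fun x => (PySem.Dict.ofList x).getD "priority" "")).map
              (pvTaskLine si.2 si.1))]) =
      (fun secs si => secs ++ pvBBlock tasks si) := by
    funext secs si
    by_cases hg : tasks.filter
        (fun t => (PySem.Dict.ofList t).getD "status" "backlog" == si.1) = []
    · rw [if_pos hg]
      simp [pvBBlock, pvGroup, hg]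
    · rw [if_neg hg, pvBBlock, if_neg (by simpa [pvGroup] using hg)]
      rfl
  rw [hfn, PySem.List.foldl_append_eq_flatMap (pvBBlock tasks) l acc]

-- each B section is the join of the corresponding A block
set_option maxHeartbeats 1000000 in
lemma pvBlock_sec (tasks : List (List (String × String))) (s i : String)
    (hic : pvIcons.getD s "⬜" = i) :
    pvBBlock tasks (s, i) =
      (if pvABlock tasks s = [] then []
       else [PySem.Str.join "\n" (pvABlock tasks s)]) := by
  by_cases hg : pvGroup tasks s = []
  · simp [pvBBlock, pvABlock, hg]
  · have hs : PySem.List.sorted2 (pvGroup tasks s) pvK1 pvK2 ≠ [] := by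
      intro h
      have hlen := (PySem.List.sorted2_perm (pvGroup tasks s) pvK1 pvK2 false).length_eq
      rw [h] at hlen
      exact hg (List.eq_nil_of_length_eq_zero hlen.symm)
    obtain ⟨x, xs, hxs⟩ := List.exists_cons_of_ne_nil hs
    simp only [pvBBlock, pvABlock, if_neg hg, hic, hxs, List.map_cons]
    rw [if_neg (List.cons_ne_nil _ _)]
    have h2 : ("</b>\n" : String) = "</b>" ++ "\n" := by decide
    have hstr : "\n<b>" ++ PySem.Str.upper s ++ "</b>\n" ++
        PySem.Str.join "\n" (pvTaskLine i s x :: List.map (pvTaskLine i s) xs) =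
        PySem.Str.join "\n" (("\n<b>" ++ PySem.Str.upper s ++ "</b>") ::
          pvTaskLine i s x :: List.map (pvTaskLine i s) xs) := by
      apply String.toList_inj.mp
      simp only [h2, String.toList_append, PySem.Str.toList_join, List.map_cons,
        PySem.Chars.join_cons_cons, List.append_assoc]
    rw [hstr]

-- ===== VERDICT (by name: the statement is the Claim_ definition above) =====
theorem format_tasks_telegram_spec : Claim_equal_format_tasks_telegram := by
  intro tasks _ _
  show format_tasks_telegram tasks = format_tasks_telegram_alt tasks
  by_cases h0 : tasks = []
  · simp [format_tasks_telegram, format_tasks_telegram_alt, h0]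
  · rw [format_tasks_telegram, format_tasks_telegram_alt, if_neg h0, if_neg h0]
    dsimp only
    rw [show (PySem.Dict.ofList [("focus", "🎯"), ("in-progress", "🔄"), ("todo", "⬜"),
        ("waiting", "⏳"), ("backlog", "📋"), ("done", "✅"), ("blocked", "🚫")] :
        PySem.Dict String String) = pvIcons from rfl]
    rw [pvA_lines tasks _ [], pvB_sections tasks _ []]
    simp only [List.nil_append]
    have hsec :
        ([("focus", "🎯"), ("in-progress", "🔄"), ("todo", "⬜"), ("waiting", "⏳"),
          ("backlog", "📋"), ("done", "✅")] : List (String × String)).flatMap (pvBBlock tasks) =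
        (["focus", "in-progress", "todo", "waiting", "backlog", "done"] : List String).flatMap
          ((fun l => if l = [] then [] else [PySem.Str.join "\n" l]) ∘ (pvABlock tasks)) := by
      simp only [List.flatMap_cons, List.flatMap_nil, Function.comp_apply,
        pvBlock_sec tasks "focus" "🎯" (by decide),
        pvBlock_sec tasks "in-progress" "🔄" (by decide),
        pvBlock_sec tasks "todo" "⬜" (by decide),
        pvBlock_sec tasks "waiting" "⏳" (by decide),
        pvBlock_sec tasks "backlog" "📋" (by decide),
        pvBlock_sec tasks "done" "✅" (by decide)]
    rw [hsec]
    have hB2 : List.flatMap ((fun l => if l = [] then [] else [PySem.Str.join "\n" l]) ∘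
          pvABlock tasks) ["focus", "in-progress", "todo", "waiting", "backlog", "done"] =
        List.flatMap (fun l => if l = [] then [] else [PySem.Str.join "\n" l])
          (List.map (pvABlock tasks)
            ["focus", "in-progress", "todo", "waiting", "backlog", "done"]) :=
      (List.flatMap_map _ _ _).symm
    have hA2 : List.flatMap (pvABlock tasks)
          ["focus", "in-progress", "todo", "waiting", "backlog", "done"] =
        (List.map (pvABlock tasks)
          ["focus", "in-progress", "todo", "waiting", "backlog", "done"]).flatten :=
      List.flatMap_def
    rw [hB2, hA2]
    set L := (["focus", "in-progress", "todo", "waiting", "backlog", "done"] : List String).map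
      (pvABlock tasks) with hL
    by_cases hf : L.flatten = []
    · rw [hf, (pvFlatMap_sec_nil (PySem.Str.join "\n") L).mpr hf]
      simp
    · rw [if_pos hf, if_neg (by
        intro h; exact hf ((pvFlatMap_sec_nil (PySem.Str.join "\n") L).mp h))]
      exact pvStr_joinEq L
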